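-- pv_equiv track=rewrite | github.com/alekanic/Synergy_Summer_Practice_2025 | ex01/main.py | analyze_positive_elements
-- ===== SOURCE A (Python) =====
-- def analyze_positive_elements(arr):
--
--     sum_positive = 0
--     count_positive = 0
--
--     for element in arr:
--         if element > 0:
--             sum_positive += element
--             count_positive += 1
--
--     return sum_positive, count_positive
-- ===== SOURCE B (Python) =====
-- def analyze_positive_elements(arr):
--     # Divide and conquer: split the index range in half, solve each half
--     # recursively, and add the (sum, count) results of the two halves.
--     def go(lo, hi):
--         n = hi - lo
--         if n == 0:
--             return 0, 0
--         if n == 1: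
--             x = arr[lo]
--             if x > 0:
--                 return x, 1
--             return 0, 0
--         mid = (lo + hi) // 2
--         s1, c1 = go(lo, mid)
--         s2, c2 = go(mid, hi)
--         return s1 + s2, c1 + c2
--     return go(0, len(arr))
-- ===== Notes on version B (the rewrite author's own statement) =====
-- stated objective: alternative
-- what changed: Replaces A's left-to-right fused accumulation loop by a divide-and-conquer recursion on index ranges: the range is split at the midpoint, each half solved recursively, and the (sum,count) pairs of the halves added; correctness rests on associativity of componentwise addition.
import Mathlib
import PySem

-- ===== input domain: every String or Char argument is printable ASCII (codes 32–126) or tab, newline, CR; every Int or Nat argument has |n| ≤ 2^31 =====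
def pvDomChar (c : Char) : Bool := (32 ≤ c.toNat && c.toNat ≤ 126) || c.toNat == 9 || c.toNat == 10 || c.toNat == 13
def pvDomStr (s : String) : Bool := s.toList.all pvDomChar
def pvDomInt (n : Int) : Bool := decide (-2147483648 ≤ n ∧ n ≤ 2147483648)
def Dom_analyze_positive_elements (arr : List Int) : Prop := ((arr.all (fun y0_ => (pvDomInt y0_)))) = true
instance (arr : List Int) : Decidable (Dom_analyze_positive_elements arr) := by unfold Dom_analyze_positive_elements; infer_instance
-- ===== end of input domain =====

-- B replaces A's fused left-to-right accumulation loop by a divide-and-conquer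
-- recursion on index ranges (split at the midpoint, add the halves' (sum,count)
-- pairs); objective: alternative algorithm of the same cost.

-- ===== PORT A =====
def analyze_positive_elements (arr : List Int) : Int × Int :=
  arr.foldl
    (fun st element =>
      if element > 0 then (st.1 + element, st.2 + 1) else st)
    (0, 0)

-- ===== PORT B =====
-- go(lo, hi) of Source B. The `n ≤ 0` guard (Python tests `n == 0`) only makes the
-- recursion total: top-level calls always keep 0 ≤ lo ≤ hi, where both agree;
-- likewise arr[lo] is always in range there, so the `none` branch is unreachable.
def pvGo (arr : List Int) (lo hi : Int) : Int × Int :=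
  let n := hi - lo
  if n ≤ 0 then (0, 0)
  else if n = 1 then
    match PySem.List.pyGet? arr lo with
    | some x => if x > 0 then (x, 1) else (0, 0)
    | none => (0, 0)
  else
    let mid := PySem.Int.floordiv (lo + hi) 2
    let p1 := pvGo arr lo mid
    let p2 := pvGo arr mid hi
    (p1.1 + p2.1, p1.2 + p2.2)
termination_by (hi - lo).toNat
decreasing_by
  all_goals
    have h2 := PySem.Int.floordiv_eq_ediv_of_pos (a := lo + hi) (b := 2) (by omega)
    omega

def analyze_positive_elements_alt (arr : List Int) : Int × Int :=
  pvGo arr 0 (arr.length : Int)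

-- ===== PRECONDITION & SPEC =====
def Spec_analyze_positive_elements (arr : List Int) (out : Int × Int) : Prop := out = analyze_positive_elements_alt arr
instance (arr : List Int) (out : Int × Int) : Decidable (Spec_analyze_positive_elements arr out) := by unfold Spec_analyze_positive_elements; infer_instance

-- ===== CLAIM (what is proved, stated in full; the proofs are below) =====
def Claim_equal_analyze_positive_elements : Prop := ∀ (arr : List Int), Dom_analyze_positive_elements arr → Spec_analyze_positive_elements arr (analyze_positive_elements arr)

-- ===== LEMMAS AND PROOFS =====

-- A's fold, started from any accumulator, adds the filtered segment's sum and count.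
theorem pv_fold_shift (arr : List Int) (s c : Int) :
    arr.foldl (fun st element => if element > 0 then (st.1 + element, st.2 + 1) else st) (s, c)
      = (s + (arr.filter (fun x => x > 0)).sum, c + ((arr.filter (fun x => x > 0)).length : Int)) := by
  induction arr generalizing s c with
  | nil => simp
  | cons x xs ih =>
    by_cases h : x > 0 <;> simp [List.foldl, List.filter, h, ih] <;> exact ⟨by ring, by ring⟩

-- pvGo on a valid index range computes (sum, count) of the positives of that segment.
theorem pvGo_eq (arr : List Int) :
    ∀ k (lo hi : Int), 0 ≤ lo → lo ≤ hi → hi ≤ (arr.length : Int) → (hi - lo).toNat = k →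
    pvGo arr lo hi =
      ((((arr.drop lo.toNat).take k).filter (fun x => x > 0)).sum,
       ((((arr.drop lo.toNat).take k).filter (fun x => x > 0)).length : Int)) := by
  intro k
  induction k using Nat.strong_induction_on with
  | _ k ih =>
    intro lo hi hlo hle hhi hk
    rcases Nat.lt_or_ge k 2 with hsmall | hbig
    · interval_cases k
      · -- empty segment
        rw [pvGo]
        simp [show hi - lo ≤ 0 by omega]
      · -- one element: arr[lo]
        have hlt : lo.toNat < arr.length := by omega
        rw [pvGo]
        rw [List.drop_eq_getElem_cons hlt]
        have hget : PySem.List.pyGet? arr lo = some arr[lo.toNat] := by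
          exact PySem.List.pyGet?_eq_some_getElem arr hlo (by omega)
        simp only [show hi - lo = 1 by omega, hget, List.take_succ_cons, List.take_zero]
        norm_num
        by_cases h : arr[lo.toNat] > 0 <;> simp [List.filter, h]
    · -- split at the midpoint
      have hmid := PySem.Int.floordiv_eq_ediv_of_pos (a := lo + hi) (b := 2) (by omega)
      set mid := PySem.Int.floordiv (lo + hi) 2 with hmiddef
      have hb1 : lo < mid := by omega
      have hb2 : mid < hi := by omega
      rw [pvGo]
      simp only [show ¬ (hi - lo ≤ 0) by omega, if_false, show ¬ (hi - lo = 1) by omega,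
        if_false, ← hmiddef]
      rw [ih (mid - lo).toNat (by omega) lo mid hlo (by omega) (by omega) rfl,
          ih (hi - mid).toNat (by omega) mid hi (by omega) (by omega) hhi rfl]
      have hsum : k = (mid - lo).toNat + (hi - mid).toNat := by omega
      have hdd : List.drop (mid - lo).toNat (List.drop lo.toNat arr)
          = List.drop mid.toNat arr := by
        rw [List.drop_drop]; congr 1; omega
      rw [hsum, List.take_add, hdd, List.filter_append, List.sum_append,
        List.length_append]
      push_cast
      simp

-- ===== VERDICT (by name: the statement is the Claim_ definition above) =====
theorem analyze_positive_elements_spec : Claim_equal_analyze_positive_elements := by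
  intro arr _
  unfold Spec_analyze_positive_elements analyze_positive_elements analyze_positive_elements_alt
  rw [pv_fold_shift arr 0 0,
      pvGo_eq arr arr.length 0 (arr.length : Int) le_rfl (by positivity) le_rfl (by omega)]
  simp
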